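-- pv_equiv track=rewrite | github.com/vykt/rootkit_battleships_online | scripts/map.py | map_place_ship
-- ===== SOURCE A (Python) =====
-- import copy
--
-- def map_place_ship_tile_validate(map_arr_copy, xpos, ypos, dim_x, dim_y):
--
--     check_pass = 1
--     temp_x = -1
--     temp_y = -1
--     x_diff = [0, 1, 0, -1, 0]
--     y_diff = [0, 0, 1, 0, -1]
--
--
--     #check bounds for xpos & ypos
--     if xpos >= dim_x or xpos < 0 or ypos >= dim_y or ypos < 0:
--         check_pass = 0
--         return check_pass
--
--     #check surrounding tiles
--     for i in range(0, 5):
--         temp_x = xpos + x_diff[i]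
--         temp_y = ypos + y_diff[i]
--         #if the modified value now falls outside the bounds of the map
--         if temp_x >= dim_x or temp_x < 0 or \
--            temp_y >= dim_y or temp_y < 0:
--             continue
--         #else it is still within the bounds
--         else:
--             if map_arr_copy[temp_x][temp_y] == '-' or \
--                map_arr_copy[temp_x][temp_y] == 'T':
--                 continue
--             else:
--                 check_pass = 0
--                 break
--
--     return check_pass
--
-- def map_place_ship(map_arr, ship_template, ship, direction, xpos, ypos, dim_x, dim_y):
--
--     map_arr_copy = copy.deepcopy(map_arr)
--     check_ret = -1
--     temp_x = -1
--     temp_y = -1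
--
--     #decide which way the ship's going
--     for i in range(ship_template[ship]):
--         if direction == -1:
--             temp_x = xpos + i
--             temp_y = ypos
--         if direction == 1:
--             temp_x = xpos
--             temp_y = ypos + i
--
--         #check the tile can be placed on
--         check_ret = map_place_ship_tile_validate(map_arr_copy, temp_x, temp_y, \
--                                                  dim_x, dim_y)
--         #If tile placement is valid
--         if check_ret == 1:
--             map_arr_copy[temp_x][temp_y] = 'T'
--         else:
--             return 1 #can't place ship here
--
--     #checking done, convert map copy as real map
--     for i in range(dim_x):
--         for j in range(dim_y):
--             if (map_arr_copy[i][j] == 'T'):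
--                 map_arr[i][j] = 'S'
--
--     return 0 #placed ship successfully
-- ===== SOURCE B (Python) =====
-- def map_place_ship(map_arr, ship_template, ship, direction, xpos, ypos, dim_x, dim_y):
--     n = ship_template[ship]
--     if n <= 0:
--         return 0  # nothing to place
--     if direction == -1:
--         sx, sy = 1, 0
--     elif direction == 1:
--         sx, sy = 0, 1
--     else:
--         return 1  # unknown direction: cannot place
--     # validate the k ship cells directly on the original map
--     for i in range(n):
--         x = xpos + i * sx
--         y = ypos + i * sy
--         if not (0 <= x < dim_x and 0 <= y < dim_y):
--             return 1
--         for nx, ny in ((x, y), (x + 1, y), (x - 1, y), (x, y + 1), (x, y - 1)):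
--             if 0 <= nx < dim_x and 0 <= ny < dim_y and map_arr[nx][ny] not in ('-', 'T'):
--                 return 1
--     # write only the k ship cells
--     for i in range(n):
--         map_arr[xpos + i * sx][ypos + i * sy] = 'S'
--     return 0
-- ===== Notes on version B (the rewrite author's own statement) =====
-- stated objective: faster
-- what changed: B validates the k ship cells (and their neighbours) directly on the original map and writes only those k cells, instead of deep-copying the whole grid, marking 'T' on the copy and scanning all dim_x*dim_y cells at the end; correctness rests on the proved invariant that marking 'T' on an already-open cell never changes any openness test.
-- outside the precondition, e.g. on map_place_ship([['X']], [1], 0, 1, 0, 0, 2, 1): A returns 1, B returns 1; on map_place_ship([['-'], []], [1], 0, 1, 0, 0, 1, 1): A returns 0, B returns 0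
import Mathlib
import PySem

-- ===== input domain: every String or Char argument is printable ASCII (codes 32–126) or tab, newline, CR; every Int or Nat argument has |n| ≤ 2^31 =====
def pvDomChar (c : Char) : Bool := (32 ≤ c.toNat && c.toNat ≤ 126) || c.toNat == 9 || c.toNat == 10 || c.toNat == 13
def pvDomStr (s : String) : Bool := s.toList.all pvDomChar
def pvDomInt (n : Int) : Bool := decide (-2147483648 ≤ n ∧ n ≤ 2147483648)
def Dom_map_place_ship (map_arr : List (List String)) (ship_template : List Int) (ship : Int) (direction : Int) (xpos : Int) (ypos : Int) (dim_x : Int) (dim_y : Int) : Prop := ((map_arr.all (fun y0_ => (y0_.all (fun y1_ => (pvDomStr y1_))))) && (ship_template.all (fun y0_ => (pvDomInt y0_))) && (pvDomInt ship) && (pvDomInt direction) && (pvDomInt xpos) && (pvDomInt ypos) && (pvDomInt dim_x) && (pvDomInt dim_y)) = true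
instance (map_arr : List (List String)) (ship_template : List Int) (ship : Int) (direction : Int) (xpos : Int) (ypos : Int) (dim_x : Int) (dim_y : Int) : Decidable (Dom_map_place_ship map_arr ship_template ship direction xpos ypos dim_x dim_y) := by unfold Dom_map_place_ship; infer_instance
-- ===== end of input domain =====

-- B validates the k ship cells directly on the original map and writes only those cells (no
-- deepcopy, no full-grid scan). Equivalence proved here is about the RETURN value only: on
-- success A additionally rewrites every pre-existing 'T' grid cell to 'S' in place, B writes
-- 'S' only on the ship cells.

-- ===== PORT A =====
-- reading map[x][y]: within Pre_ the index is always in range, so the getD defaults are never hit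
def pvGetCell (m : List (List String)) (x y : Int) : String :=
  (PySem.List.pyGet? ((PySem.List.pyGet? m x).getD []) y).getD ""

def pv_x_diff : List Int := [0, 1, 0, -1, 0]
def pv_y_diff : List Int := [0, 0, 1, 0, -1]

def pvTileLoop (m : List (List String)) (xpos ypos dim_x dim_y : Int) : List Int → Int
  | [] => 1
  | i :: rest =>
    let temp_x := xpos + (PySem.List.pyGet? pv_x_diff i).getD 0
    let temp_y := ypos + (PySem.List.pyGet? pv_y_diff i).getD 0
    if temp_x ≥ dim_x ∨ temp_x < 0 ∨ temp_y ≥ dim_y ∨ temp_y < 0 then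
      pvTileLoop m xpos ypos dim_x dim_y rest
    else if pvGetCell m temp_x temp_y = "-" ∨ pvGetCell m temp_x temp_y = "T" then
      pvTileLoop m xpos ypos dim_x dim_y rest
    else 0

def map_place_ship_tile_validate (m : List (List String)) (xpos ypos dim_x dim_y : Int) : Int :=
  if xpos ≥ dim_x ∨ xpos < 0 ∨ ypos ≥ dim_y ∨ ypos < 0 then 0
  else pvTileLoop m xpos ypos dim_x dim_y (PySem.List.pyRange 0 5 1)

-- map_arr_copy[temp_x][temp_y] = 'T': exact for the 0 ≤ temp_x, 0 ≤ temp_y always validated before a write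
def pvWriteT (m : List (List String)) (x y : Int) : List (List String) :=
  m.modify x.toNat (fun row => row.set y.toNat "T")

def pvPlaceLoop (direction xpos ypos dim_x dim_y : Int) : List (List String) → Int → Nat → Int
  | _, _, 0 => 0
  | m, i, fuel + 1 =>
    let temp_x := if direction = -1 then xpos + i else if direction = 1 then xpos else -1
    let temp_y := if direction = -1 then ypos else if direction = 1 then ypos + i else -1
    if map_place_ship_tile_validate m temp_x temp_y dim_x dim_y = 1 then
      pvPlaceLoop direction xpos ypos dim_x dim_y (pvWriteT m temp_x temp_y) (i + 1) fuel
    else 1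

-- the final Python double loop only rewrites map_arr in place ('T' → 'S'); it never affects the returned int
def map_place_ship (map_arr : List (List String)) (ship_template : List Int) (ship : Int) (direction : Int) (xpos : Int) (ypos : Int) (dim_x : Int) (dim_y : Int) : Int :=
  pvPlaceLoop direction xpos ypos dim_x dim_y map_arr 0
    ((PySem.List.pyGet? ship_template ship).getD 0).toNat

-- ===== PORT B =====
def pvOkCell (m : List (List String)) (dim_x dim_y x y : Int) : Bool :=
  decide (0 ≤ x ∧ x < dim_x ∧ 0 ≤ y ∧ y < dim_y) &&
  (([(x, y), (x + 1, y), (x - 1, y), (x, y + 1), (x, y - 1)] : List (Int × Int)).all fun p =>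
    !decide (0 ≤ p.1 ∧ p.1 < dim_x ∧ 0 ≤ p.2 ∧ p.2 < dim_y) ||
    decide (pvGetCell m p.1 p.2 = "-" ∨ pvGetCell m p.1 p.2 = "T"))

def pvCheckLoop (m : List (List String)) (dim_x dim_y sx sy xpos ypos : Int) : Int → Nat → Int
  | _, 0 => 0
  | i, fuel + 1 =>
    if pvOkCell m dim_x dim_y (xpos + i * sx) (ypos + i * sy) then
      pvCheckLoop m dim_x dim_y sx sy xpos ypos (i + 1) fuel
    else 1

-- the final 'S' writes of Source B mutate map_arr in place only; the returned int is unaffected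
def map_place_ship_alt (map_arr : List (List String)) (ship_template : List Int) (ship : Int) (direction : Int) (xpos : Int) (ypos : Int) (dim_x : Int) (dim_y : Int) : Int :=
  let n := (PySem.List.pyGet? ship_template ship).getD 0
  if n ≤ 0 then 0
  else if direction = -1 then pvCheckLoop map_arr dim_x dim_y 1 0 xpos ypos 0 n.toNat
  else if direction = 1 then pvCheckLoop map_arr dim_x dim_y 0 1 xpos ypos 0 n.toNat
  else 1

-- ===== PRECONDITION & SPEC =====
-- Pre_ excludes the inputs where the Python A can raise IndexError: a ship index outside
-- ship_template, or a grid smaller than the stated dim_x × dim_y whose out-of-range cells the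
-- validation or the final full-grid scan actually reaches (a few small-grid inputs that fail on a
-- wrong cell value before reaching an out-of-range one are excluded with the rest).
def Pre_map_place_ship (map_arr : List (List String)) (ship_template : List Int) (ship : Int) (direction : Int) (xpos : Int) (ypos : Int) (dim_x : Int) (dim_y : Int) : Prop :=
  (-(ship_template.length : Int) ≤ ship ∧ ship < (ship_template.length : Int)) ∧
  ((dim_x ≤ (map_arr.length : Int) ∧ ∀ row ∈ map_arr, dim_y ≤ (row.length : Int)) ∨
   ((PySem.List.pyGet? ship_template ship).getD 0 ≤ 0 ∧
     (dim_y ≤ 0 ∨ dim_x ≤ 0 ∨ (dim_x ≤ (map_arr.length : Int) ∧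
       ∀ row ∈ map_arr.take dim_x.toNat, dim_y ≤ (row.length : Int)))) ∨
   (0 < (PySem.List.pyGet? ship_template ship).getD 0 ∧ direction ≠ -1 ∧ direction ≠ 1) ∨
   (0 < (PySem.List.pyGet? ship_template ship).getD 0 ∧
     ¬(0 ≤ xpos ∧ xpos < dim_x ∧ 0 ≤ ypos ∧ ypos < dim_y)))
instance (map_arr : List (List String)) (ship_template : List Int) (ship : Int) (direction : Int) (xpos : Int) (ypos : Int) (dim_x : Int) (dim_y : Int) : Decidable (Pre_map_place_ship map_arr ship_template ship direction xpos ypos dim_x dim_y) := by unfold Pre_map_place_ship; infer_instance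

def pvWitness_map_place_ship : List (List String) × List Int × Int × Int × Int × Int × Int × Int :=
  ([["-", "-"], ["-", "-"]], [2], 0, 1, 0, 0, 2, 2)

def Spec_map_place_ship (map_arr : List (List String)) (ship_template : List Int) (ship : Int) (direction : Int) (xpos : Int) (ypos : Int) (dim_x : Int) (dim_y : Int) (out : Int) : Prop := out = map_place_ship_alt map_arr ship_template ship direction xpos ypos dim_x dim_y
instance (map_arr : List (List String)) (ship_template : List Int) (ship : Int) (direction : Int) (xpos : Int) (ypos : Int) (dim_x : Int) (dim_y : Int) (out : Int) : Decidable (Spec_map_place_ship map_arr ship_template ship direction xpos ypos dim_x dim_y out) := by unfold Spec_map_place_ship; infer_instance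

-- ===== CLAIM (what is proved, stated in full; the proofs are below) =====
def Claim_equal_map_place_ship : Prop := ∀ (map_arr : List (List String)) (ship_template : List Int) (ship : Int) (direction : Int) (xpos : Int) (ypos : Int) (dim_x : Int) (dim_y : Int), Dom_map_place_ship map_arr ship_template ship direction xpos ypos dim_x dim_y → Pre_map_place_ship map_arr ship_template ship direction xpos ypos dim_x dim_y → Spec_map_place_ship map_arr ship_template ship direction xpos ypos dim_x dim_y (map_place_ship map_arr ship_template ship direction xpos ypos dim_x dim_y)

-- ===== LEMMAS AND PROOFS =====

-- a cell is "open" (ship can touch it) when it reads '-' or 'T'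
def pvCellOpen (m : List (List String)) (x y : Int) : Prop :=
  pvGetCell m x y = "-" ∨ pvGetCell m x y = "T"

theorem tileLoop_char (m : List (List String)) (xpos ypos dim_x dim_y : Int) :
    ∀ L : List Int, (pvTileLoop m xpos ypos dim_x dim_y L = 1 ↔
      ∀ i ∈ L, ¬(xpos + (PySem.List.pyGet? pv_x_diff i).getD 0 ≥ dim_x ∨
                 xpos + (PySem.List.pyGet? pv_x_diff i).getD 0 < 0 ∨
                 ypos + (PySem.List.pyGet? pv_y_diff i).getD 0 ≥ dim_y ∨
                 ypos + (PySem.List.pyGet? pv_y_diff i).getD 0 < 0) →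
        pvCellOpen m (xpos + (PySem.List.pyGet? pv_x_diff i).getD 0)
                     (ypos + (PySem.List.pyGet? pv_y_diff i).getD 0)) := by
  intro L
  induction L with
  | nil => simp [pvTileLoop]
  | cons i rest ih =>
    simp only [pvTileLoop, List.mem_cons, forall_eq_or_imp]
    split_ifs with h1 h2
    · rw [ih]
      exact ⟨fun h => ⟨fun hc => absurd h1 hc, h⟩, fun h => h.2⟩
    · rw [ih]
      exact ⟨fun h => ⟨fun _ => h2, h⟩, fun h => h.2⟩
    · constructor
      · intro h; exact absurd h (by decide)
      · intro h; exact absurd (h.1 h1) h2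

-- characterisation of A's tile validation: 1 iff the cell is in bounds and the five
-- neighbourhood cells (itself included) are open wherever they are in bounds
theorem tv_char (m : List (List String)) (x y dim_x dim_y : Int) :
    map_place_ship_tile_validate m x y dim_x dim_y = 1 ↔
    ((0 ≤ x ∧ x < dim_x ∧ 0 ≤ y ∧ y < dim_y) ∧
      ∀ p ∈ ([(x, y), (x + 1, y), (x - 1, y), (x, y + 1), (x, y - 1)] : List (Int × Int)),
        (0 ≤ p.1 ∧ p.1 < dim_x ∧ 0 ≤ p.2 ∧ p.2 < dim_y) → pvCellOpen m p.1 p.2) := by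
  have hr : PySem.List.pyRange 0 5 1 = [0, 1, 2, 3, 4] := by decide
  have c0x : (PySem.List.pyGet? pv_x_diff 0).getD 0 = 0 := by decide
  have c1x : (PySem.List.pyGet? pv_x_diff 1).getD 0 = 1 := by decide
  have c2x : (PySem.List.pyGet? pv_x_diff 2).getD 0 = 0 := by decide
  have c3x : (PySem.List.pyGet? pv_x_diff 3).getD 0 = -1 := by decide
  have c4x : (PySem.List.pyGet? pv_x_diff 4).getD 0 = 0 := by decide
  have c0y : (PySem.List.pyGet? pv_y_diff 0).getD 0 = 0 := by decide
  have c1y : (PySem.List.pyGet? pv_y_diff 1).getD 0 = 0 := by decide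
  have c2y : (PySem.List.pyGet? pv_y_diff 2).getD 0 = 1 := by decide
  have c3y : (PySem.List.pyGet? pv_y_diff 3).getD 0 = 0 := by decide
  have c4y : (PySem.List.pyGet? pv_y_diff 4).getD 0 = -1 := by decide
  have e1 : x + (-1) = x - 1 := by ring
  have e2 : y + (-1) = y - 1 := by ring
  rw [map_place_ship_tile_validate]
  split_ifs with hb
  · simp only [show (0 : Int) ≠ 1 by decide, false_iff]
    intro h
    exact absurd h.1 (by omega)
  · rw [hr, tileLoop_char]
    simp only [List.mem_cons, List.not_mem_nil, or_false, forall_eq_or_imp, forall_eq,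
      c0x, c1x, c2x, c3x, c4x, c0y, c1y, c2y, c3y, c4y, add_zero, e1, e2]
    constructor
    · rintro ⟨p0, p1, p2, p3, p4⟩
      exact ⟨by omega, fun hc => p0 (by omega), fun hc => p1 (by omega),
        fun hc => p3 (by omega), fun hc => p2 (by omega), fun hc => p4 (by omega)⟩
    · rintro ⟨hi, q0, q1, q3, q2, q4⟩
      exact ⟨fun hc => q0 (by omega), fun hc => q1 (by omega), fun hc => q2 (by omega),
        fun hc => q3 (by omega), fun hc => q4 (by omega)⟩

-- the same characterisation for B's cell check
theorem ok_char (m : List (List String)) (x y dim_x dim_y : Int) :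
    pvOkCell m dim_x dim_y x y = true ↔
    ((0 ≤ x ∧ x < dim_x ∧ 0 ≤ y ∧ y < dim_y) ∧
      ∀ p ∈ ([(x, y), (x + 1, y), (x - 1, y), (x, y + 1), (x, y - 1)] : List (Int × Int)),
        (0 ≤ p.1 ∧ p.1 < dim_x ∧ 0 ≤ p.2 ∧ p.2 < dim_y) → pvCellOpen m p.1 p.2) := by
  simp only [pvOkCell, Bool.and_eq_true, List.all_eq_true, Bool.or_eq_true, Bool.not_eq_eq_eq_not,
    Bool.not_true, decide_eq_false_iff_not, decide_eq_true_eq, pvCellOpen]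
  constructor
  · rintro ⟨h1, h2⟩
    exact ⟨h1, fun p hp hin => (h2 p hp).resolve_left (by tauto)⟩
  · rintro ⟨h1, h2⟩
    refine ⟨h1, fun p hp => ?_⟩
    by_cases hin : 0 ≤ p.1 ∧ p.1 < dim_x ∧ 0 ≤ p.2 ∧ p.2 < dim_y
    · exact Or.inr (h2 p hp hin)
    · exact Or.inl hin

theorem pvIdx_nonneg (n : Nat) (i : Int) (hi : 0 ≤ i) :
    PySem.List.pyIdx? n i = if i < (n : Int) then some i.toNat else none := by
  simp only [PySem.List.pyIdx?, if_pos hi]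

theorem open_elim (m : List (List String)) (x y : Int) (hx : 0 ≤ x) (hy : 0 ≤ y)
    (h : pvCellOpen m x y) :
    ∃ row, PySem.List.pyIdx? m.length x = some x.toNat ∧ m[x.toNat]? = some row ∧
      PySem.List.pyIdx? row.length y = some y.toNat ∧ y.toNat < row.length ∧
      (row[y.toNat]? = some "-" ∨ row[y.toNat]? = some "T") := by
  simp only [pvCellOpen, pvGetCell, PySem.List.pyGet?] at h
  rw [pvIdx_nonneg _ _ hx] at h
  by_cases hxl : x < (m.length : Int)
  · rw [if_pos hxl] at h
    simp only [Option.bind_some] at h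
    cases hrow : m[x.toNat]? with
    | none =>
      rw [hrow, Option.getD_none] at h
      rw [pvIdx_nonneg _ _ hy] at h
      simp only [List.length_nil, Nat.cast_zero] at h
      rw [if_neg (by omega)] at h
      simp at h
    | some row =>
      rw [hrow, Option.getD_some] at h
      rw [pvIdx_nonneg _ _ hy] at h
      by_cases hyl : y < (row.length : Int)
      · rw [if_pos hyl] at h
        simp only [Option.bind_some] at h
        cases hv : row[y.toNat]? with
        | none => rw [hv, Option.getD_none] at h; simp at h
        | some v =>
          rw [hv, Option.getD_some] at h
          refine ⟨row, by rw [pvIdx_nonneg _ _ hx, if_pos hxl], rfl,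
            by rw [pvIdx_nonneg _ _ hy, if_pos hyl], by omega, ?_⟩
          cases h with
          | inl h => left; rw [hv, h]
          | inr h => right; rw [hv, h]
      · rw [if_neg hyl] at h
        simp at h
  · rw [if_neg hxl] at h
    simp at h

theorem getCell_write (m : List (List String)) (x y a b : Int) (hx : 0 ≤ x) (hy : 0 ≤ y)
    (hop : pvCellOpen m x y) :
    pvGetCell (pvWriteT m x y) a b = pvGetCell m a b ∨
    (pvGetCell (pvWriteT m x y) a b = "T" ∧ pvCellOpen m a b) := by
  obtain ⟨row, hix, hrow, hiy, hyl, hval⟩ := open_elim m x y hx hy hop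
  simp only [pvGetCell, PySem.List.pyGet?, pvWriteT, List.length_modify]
  cases hj : PySem.List.pyIdx? m.length a with
  | none => left; rfl
  | some j =>
    simp only [Option.bind_some]
    rw [List.getElem?_modify]
    by_cases hxj : x.toNat = j
    · subst hxj
      rw [hrow]
      have hred : ((fun r : List String => if x.toNat = x.toNat then r.set y.toNat "T" else r) <$>
          some row) = some (row.set y.toNat "T") := by simp
      rw [hred]
      simp only [Option.getD_some, List.length_set]
      cases hj2 : PySem.List.pyIdx? row.length b with
      | none => left; rfl
      | some k =>
        simp only [Option.bind_some]
        by_cases hyk : y.toNat = k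
        · subst hyk
          right
          constructor
          · rw [List.getElem?_set_self hyl, Option.getD_some]
          · simp only [pvCellOpen, pvGetCell, PySem.List.pyGet?, hj, Option.bind_some, hrow,
              Option.getD_some, hj2]
            cases hval with
            | inl h => left; rw [h, Option.getD_some]
            | inr h => right; rw [h, Option.getD_some]
        · left
          rw [List.getElem?_set_ne (by omega)]
    · left
      cases hm : m[j]? with
      | none => rfl
      | some r => simp [hxj]

-- writing 'T' on an open cell changes no cell's openness
theorem open_write (m : List (List String)) (x y : Int) (hx : 0 ≤ x) (hy : 0 ≤ y)
    (hop : pvCellOpen m x y) (a b : Int) :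
    pvCellOpen (pvWriteT m x y) a b ↔ pvCellOpen m a b := by
  rcases getCell_write m x y a b hx hy hop with heq | ⟨hT, hopb⟩
  · unfold pvCellOpen
    rw [heq]
  · constructor
    · intro _; exact hopb
    · intro _; unfold pvCellOpen; rw [hT]; right; rfl

theorem tv_iff_ok (m m0 : List (List String)) (x y dim_x dim_y : Int)
    (inv : ∀ a b, pvCellOpen m a b ↔ pvCellOpen m0 a b) :
    map_place_ship_tile_validate m x y dim_x dim_y = 1 ↔ pvOkCell m0 dim_x dim_y x y = true := by
  rw [tv_char, ok_char]
  constructor <;> rintro ⟨h1, h2⟩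
  · exact ⟨h1, fun p hp hin => (inv p.1 p.2).mp (h2 p hp hin)⟩
  · exact ⟨h1, fun p hp hin => (inv p.1 p.2).mpr (h2 p hp hin)⟩

-- A's placement loop on the mutated copy agrees with B's check loop on the original,
-- as long as the copy has the same open cells as the original
set_option maxHeartbeats 1600000 in
theorem loop_eq (direction xpos ypos dim_x dim_y sx sy : Int)
    (hdir : (direction = -1 ∧ sx = 1 ∧ sy = 0) ∨ (direction = 1 ∧ sx = 0 ∧ sy = 1)) :
    ∀ (fuel : Nat) (m m0 : List (List String)) (i : Int),
      (∀ a b, pvCellOpen m a b ↔ pvCellOpen m0 a b) →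
      pvPlaceLoop direction xpos ypos dim_x dim_y m i fuel =
        pvCheckLoop m0 dim_x dim_y sx sy xpos ypos i fuel := by
  intro fuel
  induction fuel with
  | zero => intro m m0 i inv; rfl
  | succ k ih =>
    intro m m0 i inv
    have hne : ¬((1 : Int) = -1) := by decide
    obtain ⟨hd, hsx, hsy⟩ | ⟨hd, hsx, hsy⟩ := hdir <;> subst hd <;> subst hsx <;> subst hsy
    · simp only [pvPlaceLoop, pvCheckLoop, if_true, mul_one, mul_zero, add_zero]
      by_cases hok : pvOkCell m0 dim_x dim_y (xpos + i) ypos = true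
      · rw [if_pos ((tv_iff_ok m m0 _ _ _ _ inv).mpr hok), if_pos hok]
        have htv := (tv_iff_ok m m0 (xpos + i) ypos dim_x dim_y inv).mpr hok
        obtain ⟨hb, hopen⟩ := (tv_char m (xpos + i) ypos dim_x dim_y).mp htv
        have hop : pvCellOpen m (xpos + i) ypos :=
          hopen (xpos + i, ypos) (by simp) hb
        exact ih _ _ _ (fun a b =>
          (open_write m (xpos + i) ypos (by omega) (by omega) hop a b).trans (inv a b))
      · rw [if_neg (fun hc => hok ((tv_iff_ok m m0 _ _ _ _ inv).mp hc)), if_neg hok]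
    · simp only [pvPlaceLoop, pvCheckLoop, if_neg hne, if_true, mul_one, mul_zero, add_zero]
      by_cases hok : pvOkCell m0 dim_x dim_y xpos (ypos + i) = true
      · rw [if_pos ((tv_iff_ok m m0 _ _ _ _ inv).mpr hok), if_pos hok]
        have htv := (tv_iff_ok m m0 xpos (ypos + i) dim_x dim_y inv).mpr hok
        obtain ⟨hb, hopen⟩ := (tv_char m xpos (ypos + i) dim_x dim_y).mp htv
        have hop : pvCellOpen m xpos (ypos + i) :=
          hopen (xpos, ypos + i) (by simp) hb
        exact ih _ _ _ (fun a b =>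
          (open_write m xpos (ypos + i) (by omega) (by omega) hop a b).trans (inv a b))
      · rw [if_neg (fun hc => hok ((tv_iff_ok m m0 _ _ _ _ inv).mp hc)), if_neg hok]

theorem main_eq (map_arr : List (List String)) (ship_template : List Int) (ship direction xpos ypos dim_x dim_y : Int) :
    map_place_ship map_arr ship_template ship direction xpos ypos dim_x dim_y =
    map_place_ship_alt map_arr ship_template ship direction xpos ypos dim_x dim_y := by
  rw [map_place_ship, map_place_ship_alt]
  set n := (PySem.List.pyGet? ship_template ship).getD 0 with hn
  by_cases h0 : n ≤ 0
  · have ht : n.toNat = 0 := by omega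
    rw [ht, if_pos h0]
    rfl
  · obtain ⟨k, hk⟩ : ∃ k, n.toNat = k + 1 := ⟨n.toNat - 1, by omega⟩
    rw [if_neg h0]
    by_cases hd1 : direction = -1
    · subst hd1
      rw [if_pos rfl]
      exact loop_eq (-1) xpos ypos dim_x dim_y 1 0 (Or.inl ⟨rfl, rfl, rfl⟩) n.toNat
        map_arr map_arr 0 (fun a b => Iff.rfl)
    · by_cases hd2 : direction = 1
      · subst hd2
        rw [if_neg hd1, if_pos rfl]
        exact loop_eq 1 xpos ypos dim_x dim_y 0 1 (Or.inr ⟨rfl, rfl, rfl⟩) n.toNat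
          map_arr map_arr 0 (fun a b => Iff.rfl)
      · rw [if_neg hd1, if_neg hd2, hk]
        simp only [pvPlaceLoop, if_neg hd1, if_neg hd2]
        have hv : map_place_ship_tile_validate map_arr (-1) (-1) dim_x dim_y = 0 := by
          rw [map_place_ship_tile_validate, if_pos (Or.inr (Or.inl (by decide)))]
        rw [if_neg (by rw [hv]; decide)]

-- ===== VERDICT (by name: the statement is the Claim_ definition above) =====
theorem map_place_ship_spec : Claim_equal_map_place_ship := by
  intro map_arr ship_template ship direction xpos ypos dim_x dim_y _ _
  unfold Spec_map_place_ship
  exact main_eq map_arr ship_template ship direction xpos ypos dim_x dim_y
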